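-- pv_equiv track=rewrite | github.com/argilla-io/argilla | src/rubrix/server/tasks/commons/helpers.py | takeuntil
-- ===== SOURCE A (Python) =====
-- def takeuntil(iterable, limit: int):
--     """
--     Iterate over inner iterable until a count limit
--
--     Parameters
--     ----------
--     iterable:
--         The inner iterable
--     limit:
--         The limit
--
--     Returns
--     -------
--
--     """
--     count = 0
--     for e in iterable:
--         if count < limit:
--             yield e
--             count += 1
--         else:
--             break
-- ===== SOURCE B (Python) =====
-- def takeuntil(iterable, limit: int):
--     """Yield the limited prefix via a slice instead of a counter loop."""
--     yield from list(iterable)[:max(0, limit)]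
-- ===== Notes on version B (the rewrite author's own statement) =====
-- stated objective: simpler
-- what changed: The manual counter with if/break is replaced by yielding the slice iterable[:max(0, limit)], so no per-element bookkeeping remains.
import Mathlib
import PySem

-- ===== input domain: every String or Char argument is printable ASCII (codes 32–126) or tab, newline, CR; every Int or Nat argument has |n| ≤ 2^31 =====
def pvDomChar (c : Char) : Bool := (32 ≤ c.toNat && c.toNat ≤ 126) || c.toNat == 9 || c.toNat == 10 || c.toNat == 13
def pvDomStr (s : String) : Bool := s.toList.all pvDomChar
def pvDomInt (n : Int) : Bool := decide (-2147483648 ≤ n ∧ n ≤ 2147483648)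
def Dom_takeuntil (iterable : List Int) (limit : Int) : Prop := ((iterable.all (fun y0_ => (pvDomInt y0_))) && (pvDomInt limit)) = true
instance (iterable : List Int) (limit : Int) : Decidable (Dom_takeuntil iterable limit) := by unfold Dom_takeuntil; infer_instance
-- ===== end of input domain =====

-- ===== PORT A =====
-- loop with counter; breaks once count reaches limit
def takeuntilGo (iterable : List Int) (count limit : Int) : List Int :=
  match iterable with
  | [] => []
  | e :: rest => if count < limit then e :: takeuntilGo rest (count + 1) limit else []

def takeuntil (iterable : List Int) (limit : Int) : List Int :=
  takeuntilGo iterable 0 limit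

-- ===== PORT B =====
-- yield from list(iterable)[:max(0, limit)]
def takeuntil_alt (iterable : List Int) (limit : Int) : List Int :=
  PySem.List.slice iterable none (some (max 0 limit))

-- ===== PRECONDITION & SPEC =====
def Spec_takeuntil (iterable : List Int) (limit : Int) (out : List Int) : Prop := out = takeuntil_alt iterable limit
instance (iterable : List Int) (limit : Int) (out : List Int) : Decidable (Spec_takeuntil iterable limit out) := by unfold Spec_takeuntil; infer_instance

-- ===== CLAIM (what is proved, stated in full; the proofs are below) =====
def Claim_equal_takeuntil : Prop := ∀ (iterable : List Int) (limit : Int), Dom_takeuntil iterable limit → Spec_takeuntil iterable limit (takeuntil iterable limit)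

-- ===== LEMMAS AND PROOFS =====

-- ===== VERDICT (by name: the statement is the Claim_ definition above) =====
lemma takeuntilGo_eq_take (iterable : List Int) (count limit : Int) :
    takeuntilGo iterable count limit = iterable.take (limit - count).toNat := by
  induction iterable generalizing count with
  | nil => simp [takeuntilGo]
  | cons e rest ih =>
    by_cases h : count < limit
    · have hn : (limit - count).toNat = (limit - (count + 1)).toNat + 1 := by omega
      simp [takeuntilGo, h, ih, hn]
    · have hn : (limit - count).toNat = 0 := by omega
      simp [takeuntilGo, h, hn]

theorem takeuntil_spec : Claim_equal_takeuntil := by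
  intro iterable limit _
  unfold Spec_takeuntil takeuntil takeuntil_alt
  rw [takeuntilGo_eq_take]
  simp [PySem.List.slice]
  congr 1
  omega
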